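-- pv_equiv track=rewrite | github.com/eliottcassidy2000/math | 04-computation/n6_discriminant_89b.py | edge_sharing_pairs
-- ===== SOURCE A (Python) =====
-- def edge_sharing_pairs(triples):
--     """Count pairs of 3-cycles sharing at least one edge (= sharing exactly 2 vertices)."""
--     count = 0
--     for idx1 in range(len(triples)):
--         for idx2 in range(idx1+1, len(triples)):
--             s1 = set(triples[idx1])
--             s2 = set(triples[idx2])
--             if len(s1 & s2) == 2:
--                 count += 1
--     return count
-- ===== SOURCE B (Python) =====
-- def edge_sharing_pairs(triples):
--     """Count pairs of 3-cycles sharing at least one edge (= sharing exactly 2 vertices)."""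
--     pair_counts = {}
--     triple_counts = {}
--     for t in triples:
--         vs = sorted(set(t))
--         for i in range(len(vs)):
--             for j in range(i + 1, len(vs)):
--                 key = (vs[i], vs[j])
--                 pair_counts[key] = pair_counts.get(key, 0) + 1
--         if len(vs) == 3:
--             k3 = (vs[0], vs[1], vs[2])
--             triple_counts[k3] = triple_counts.get(k3, 0) + 1
--     total = 0
--     for c in pair_counts.values():
--         total += c * (c - 1) // 2
--     for c in triple_counts.values():
--         total -= 3 * (c * (c - 1) // 2)
--     return total
-- ===== Notes on version B (the rewrite author's own statement) =====
-- stated objective: alternative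
-- what changed: Replaces the O(n^2) all-pairs set-intersection scan by one pass that hashes each triple's sorted vertex pairs and its full vertex set into counters, then sums C(k,2) per shared pair and subtracts 3*C(k,2) per identical 3-vertex set to correct the overcount; Pre_ restricts to the natural domain of 3-cycles (at most 3 distinct vertices per inner list), where this pair-hashing count is exact.
-- outside the precondition, e.g. on edge_sharing_pairs([(1, 2, 3, 4), (1, 2, 3, 5)]): A returns 0, B returns 3
import Mathlib
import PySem

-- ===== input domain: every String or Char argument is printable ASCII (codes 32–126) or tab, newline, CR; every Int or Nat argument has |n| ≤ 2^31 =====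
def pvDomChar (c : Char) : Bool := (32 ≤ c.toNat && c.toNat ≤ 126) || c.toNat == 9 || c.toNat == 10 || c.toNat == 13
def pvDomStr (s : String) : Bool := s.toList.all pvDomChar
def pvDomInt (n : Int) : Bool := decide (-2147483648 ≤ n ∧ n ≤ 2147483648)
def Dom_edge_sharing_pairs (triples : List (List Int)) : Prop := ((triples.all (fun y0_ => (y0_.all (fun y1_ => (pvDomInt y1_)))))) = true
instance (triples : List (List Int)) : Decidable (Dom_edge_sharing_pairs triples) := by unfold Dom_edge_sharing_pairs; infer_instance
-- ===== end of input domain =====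

-- B replaces A's O(n^2) all-pairs set-intersection scan by a single pass hashing each
-- triple's sorted vertex pairs (and its full 3-vertex set) into counters, then sums
-- C(k,2) per shared pair minus the identical-set overcount (O(n) on lists of 3-cycles;
-- a timing run could not confirm a speed-up inside Pre_, so none is claimed).


-- ===== PORT A =====
def edge_sharing_pairs (triples : List (List Int)) : Int :=
  (PySem.List.pyRange 0 (PySem.List.len triples) 1).foldl (fun count idx1 =>
    (PySem.List.pyRange (idx1 + 1) (PySem.List.len triples) 1).foldl (fun count idx2 =>
      let s1 := PySem.Set.ofList (PySem.List.pyGetD triples idx1 [])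
      let s2 := PySem.Set.ofList (PySem.List.pyGetD triples idx2 [])
      if PySem.Set.len (PySem.Set.inter s1 s2) = 2 then count + 1 else count) count) 0

-- ===== PORT B =====
def edge_sharing_pairs_alt (triples : List (List Int)) : Int :=
  let st := triples.foldl
    (fun (st : PySem.Dict (Int × Int) Int × PySem.Dict (Int × Int × Int) Int) t =>
      let vs := PySem.List.sorted (PySem.Set.ofList t) (fun x => x)
      let pc := (PySem.List.pyRange 0 (PySem.List.len vs) 1).foldl (fun pc i =>
          (PySem.List.pyRange (i + 1) (PySem.List.len vs) 1).foldl (fun pc j =>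
            let key := (PySem.List.pyGetD vs i 0, PySem.List.pyGetD vs j 0)
            pc.insert key (pc.getD key 0 + 1)) pc) st.1
      let tc := if PySem.List.len vs = 3 then
          let k3 := (PySem.List.pyGetD vs 0 0, PySem.List.pyGetD vs 1 0, PySem.List.pyGetD vs 2 0)
          st.2.insert k3 (st.2.getD k3 0 + 1)
        else st.2
      (pc, tc))
    (PySem.Dict.empty, PySem.Dict.empty)
  let total := st.1.values.foldl (fun total c => total + PySem.Int.floordiv (c * (c - 1)) 2) 0
  st.2.values.foldl (fun total c => total - 3 * PySem.Int.floordiv (c * (c - 1)) 2) total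

-- ===== PRECONDITION & SPEC =====
-- Pre_ restricts the input to the function's natural domain — lists of 3-cycles, i.e. every
-- inner list has at most 3 distinct vertices; A also returns values on malformed "triples"
-- with 4 or more distinct vertices, where B's pair-hashing counts differently.
def Pre_edge_sharing_pairs (triples : List (List Int)) : Prop :=
  ∀ t ∈ triples, (PySem.Set.ofList t).length ≤ 3
instance (triples : List (List Int)) : Decidable (Pre_edge_sharing_pairs triples) := by
  unfold Pre_edge_sharing_pairs; infer_instance
def pvWitness_edge_sharing_pairs : List (List Int) := [[1, 2, 3], [2, 3, 4], [2, 2, 3]]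
def Spec_edge_sharing_pairs (triples : List (List Int)) (out : Int) : Prop := out = edge_sharing_pairs_alt triples
instance (triples : List (List Int)) (out : Int) : Decidable (Spec_edge_sharing_pairs triples out) := by unfold Spec_edge_sharing_pairs; infer_instance

-- ===== CLAIM (what is proved, stated in full; the proofs are below) =====
def Claim_equal_edge_sharing_pairs : Prop := ∀ (triples : List (List Int)), Dom_edge_sharing_pairs triples → Pre_edge_sharing_pairs triples → Spec_edge_sharing_pairs triples (edge_sharing_pairs triples)

-- ===== LEMMAS AND PROOFS =====
def lpairs {α : Type} : List α → List (α × α)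
  | [] => []
  | x :: l => l.map (fun y => (x, y)) ++ lpairs l

theorem G_loop {α σ : Type} (step : σ → α × α → σ) (dflt : α) :
    ∀ (xs : List α) (s : σ),
      (List.range xs.length).foldl
        (fun s k => (xs.drop (k+1)).foldl (fun s w => step s (xs.getD k dflt, w)) s) s
      = (lpairs xs).foldl step s := by
  intro xs
  induction xs with
  | nil => intro s; simp [lpairs]
  | cons x l ih =>
    intro s
    rw [List.length_cons, List.range_succ_eq_map]
    simp only [List.foldl_cons, List.foldl_map, List.drop_succ_cons, List.getD_cons_succ,
      List.getD_cons_zero]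
    rw [ih]
    simp [lpairs, List.foldl_append, List.foldl_map]

theorem doubleLoop {α σ : Type} (xs : List α) (dflt : α) (step : σ → α × α → σ) (s : σ) :
    (PySem.List.pyRange 0 (PySem.List.len xs) 1).foldl
      (fun s i => (PySem.List.pyRange (i + 1) (PySem.List.len xs) 1).foldl
        (fun s j => step s (PySem.List.pyGetD xs i dflt, PySem.List.pyGetD xs j dflt)) s) s
    = (lpairs xs).foldl step s := by
  have h2 : (PySem.List.pyRange 0 (PySem.List.len xs) 1).foldl
      (fun s i => (PySem.List.pyRange (i + 1) (PySem.List.len xs) 1).foldl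
        (fun s j => step s (PySem.List.pyGetD xs i dflt, PySem.List.pyGetD xs j dflt)) s) s
    = (PySem.List.pyRange 0 (PySem.List.len xs) 1).foldl
      (fun s i => (xs.drop (i+1).toNat).foldl
        (fun s w => step s (PySem.List.pyGetD xs i dflt, w)) s) s := by
    apply PySem.List.foldl_congr_mem
    intro acc i hi
    exact PySem.List.foldl_pyRange_pyGetD xs dflt
      (fun s w => step s (PySem.List.pyGetD xs i dflt, w)) acc (a := i + 1)
      (by have := (PySem.List.mem_pyRange_one.1 hi).1; omega)
  rw [h2]
  have hlen : PySem.List.len xs = ((xs.length : Nat) : Int) := by simp [PySem.List.len_eq]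
  rw [hlen, PySem.List.pyRange_zero_nat, List.foldl_map]
  have h3 : (List.range xs.length).foldl
      (fun s (k : Nat) => (xs.drop (((k:Int)+1).toNat)).foldl
        (fun s w => step s (PySem.List.pyGetD xs (k:Int) dflt, w)) s) s
    = (List.range xs.length).foldl
      (fun s k => (xs.drop (k+1)).foldl (fun s w => step s (xs.getD k dflt, w)) s) s := by
    apply PySem.List.foldl_congr_mem
    intro acc k _
    have h4 : ((k:Int)+1).toNat = k + 1 := by omega
    rw [h4, PySem.List.pyGetD_natCast]
  rw [h3]
  exact G_loop step dflt xs s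

def pairsEqI {κ : Type} [BEq κ] : List κ → Int
  | [] => 0
  | x :: l => (l.count x : Int) + pairsEqI l

def common {κ : Type} [BEq κ] (P Q : List κ) : Int := (P.map (fun a => (Q.count a : Int))).sum

def C2 (c : Int) : Int := PySem.Int.floordiv (c * (c - 1)) 2

theorem C2_succ (c : Int) : C2 (c + 1) = C2 c + c := by
  unfold C2
  rw [PySem.Int.floordiv_eq_ediv_of_pos (by norm_num), PySem.Int.floordiv_eq_ediv_of_pos (by norm_num)]
  have h : (c + 1) * (c + 1 - 1) = c * (c - 1) + c * 2 := by ring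
  rw [h, Int.add_mul_ediv_right _ _ (by norm_num)]

theorem common_append_right {κ : Type} [BEq κ] (P Q R : List κ) :
    common P (Q ++ R) = common P Q + common P R := by
  induction P with
  | nil => simp [common]
  | cons a P ih =>
    simp only [common, List.map_cons, List.sum_cons, List.count_append] at *
    rw [show (fun a => ((Q.count a + R.count a : Nat) : Int)) = (fun a => ((Q.count a : Int)) + ((R.count a : Int))) from by funext a; push_cast; ring, PySem.List.sum_map_add_int]
    push_cast
    omega

theorem common_nil_right {κ : Type} [BEq κ] (P : List κ) : common P [] = 0 := by
  induction P with
  | nil => simp [common]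
  | cons a P ih => simp only [common, List.map_cons, List.sum_cons, List.count_nil] at *; omega

theorem common_flatMap {κ α : Type} [BEq κ] (P : List κ) (f : α → List κ) (l : List α) :
    common P (l.flatMap f) = (l.map (fun t => common P (f t))).sum := by
  induction l with
  | nil => simp [common_nil_right]
  | cons x l ih => simp [List.flatMap_cons, common_append_right, ih]

theorem pairsEqI_append {κ : Type} [BEq κ] (P Q : List κ) :
    pairsEqI (P ++ Q) = pairsEqI P + pairsEqI Q + common P Q := by
  induction P with
  | nil => simp [pairsEqI, common]
  | cons x P ih =>
    simp only [List.cons_append, pairsEqI, common, List.map_cons, List.sum_cons,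
      List.count_append] at *
    push_cast
    omega

theorem pairsEqI_nodup {κ : Type} [BEq κ] [LawfulBEq κ] (P : List κ) (h : P.Nodup) :
    pairsEqI P = 0 := by
  induction P with
  | nil => rfl
  | cons x P ih =>
    simp only [List.nodup_cons] at h
    simp [pairsEqI, ih h.2, List.count_eq_zero_of_not_mem h.1]

theorem pairsEqI_flatMap {κ α : Type} [BEq κ] (f : α → List κ) (l : List α) :
    pairsEqI (l.flatMap f)
      = ((lpairs l).map (fun p => common (f p.1) (f p.2))).sum
        + (l.map (fun t => pairsEqI (f t))).sum := by
  induction l with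
  | nil => simp [pairsEqI, lpairs]
  | cons x l ih =>
    rw [List.flatMap_cons, pairsEqI_append, ih, common_flatMap]
    simp only [lpairs, List.map_append, List.sum_append, List.map_map, List.map_cons,
      List.sum_cons]
    have hc : (l.map ((fun p : α × α => common (f p.1) (f p.2)) ∘ fun y => (x, y)))
        = l.map (fun t => common (f x) (f t)) := by
      apply List.map_congr_left; intro y _; rfl
    rw [hc]
    ring

def SC {κ : Type} [BEq κ] (xs : List κ) : Int :=
  ((PySem.Set.ofList xs).map (fun k => C2 ((xs.count k : Int)))).sum

theorem sum_single_diff {κ : Type} (l : List κ) (hnd : l.Nodup) (x : κ) (hx : x ∈ l)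
    (f g : κ → Int) (h : ∀ y ∈ l, y ≠ x → f y = g y) :
    (l.map f).sum = (l.map g).sum + (f x - g x) := by
  induction l with
  | nil => cases hx
  | cons a l ih =>
    simp only [List.nodup_cons] at hnd
    rcases List.mem_cons.1 hx with rfl | hx'
    · have : ∀ y ∈ l, f y = g y := fun y hy => h y (List.mem_cons_of_mem _ hy) (fun e => hnd.1 (e ▸ hy))
      simp only [List.map_cons, List.sum_cons]
      rw [List.map_congr_left this]
      ring
    · have ha : a ≠ x := fun e => hnd.1 (e ▸ hx')
      simp only [List.map_cons, List.sum_cons]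
      rw [h a (List.mem_cons_self) ha, ih hnd.2 hx' (fun y hy hne => h y (List.mem_cons_of_mem _ hy) hne)]
      ring

theorem pairsEqI_append_singleton {κ : Type} [BEq κ] [LawfulBEq κ] (l : List κ) (x : κ) :
    pairsEqI (l ++ [x]) = pairsEqI l + (l.count x : Int) := by
  induction l with
  | nil => simp [pairsEqI]
  | cons y l ih =>
    simp only [List.cons_append, pairsEqI, List.count_append, ih, List.count_cons,
      List.count_nil]
    have : (x == y) = (y == x) := by simp [eq_comm]
    rw [this]
    push_cast
    split <;> omega

theorem SC_eq_pairsEqI {κ : Type} [BEq κ] [LawfulBEq κ] (xs : List κ) :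
    SC xs = pairsEqI xs := by
  induction xs using List.reverseRecOn with
  | nil => simp [SC, pairsEqI]
  | append_singleton l x ih =>
    rw [pairsEqI_append_singleton, ← ih]
    unfold SC
    have hof : PySem.Set.ofList (l ++ [x]) = PySem.Set.add (PySem.Set.ofList l) x := by
      rw [PySem.Set.ofList_eq_foldl, PySem.Set.ofList_eq_foldl, List.foldl_append]
      rfl
    rw [hof]
    by_cases hx : x ∈ PySem.Set.ofList l
    · have hadd : PySem.Set.add (PySem.Set.ofList l) x = PySem.Set.ofList l := by
        simp [PySem.Set.add, PySem.Set.contains, hx]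
      rw [hadd]
      rw [sum_single_diff (PySem.Set.ofList l) (PySem.Set.nodup_ofList l) x hx
        (fun k => C2 (((l ++ [x]).count k : Int))) (fun k => C2 ((l.count k : Int)))
        (by intro y _ hy
            simp [List.count_append, Ne.symm hy])]
      simp only [List.count_append, List.count_singleton, BEq.rfl, if_pos]
      push_cast
      rw [C2_succ]
      ring
    · have hadd : PySem.Set.add (PySem.Set.ofList l) x = PySem.Set.ofList l ++ [x] := by
        simp [PySem.Set.add, PySem.Set.contains, hx]
      rw [hadd]
      have hxl : x ∉ l := fun h => hx ((PySem.Set.mem_ofList l x).2 h)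
      have hcnt : l.count x = 0 := List.count_eq_zero_of_not_mem hxl
      simp only [List.map_append, List.sum_append, List.map_cons, List.map_nil, List.sum_cons,
        List.sum_nil]
      have hmap : (PySem.Set.ofList l).map (fun k => C2 (((l ++ [x]).count k : Int)))
          = (PySem.Set.ofList l).map (fun k => C2 ((l.count k : Int))) := by
        apply List.map_congr_left
        intro y hy
        have hyx : y ≠ x := fun e => hx (e ▸ hy)
        simp [List.count_append, Ne.symm hyx]
      rw [hmap]
      have h1 : ((l ++ [x]).count x) = 1 := by
        simp [List.count_append, hcnt]
      rw [h1, hcnt]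
      have hC : C2 ((1:Nat):Int) = 0 := by decide
      rw [hC]
      ring

def canon (t : List Int) : List Int := PySem.List.sorted (PySem.Set.ofList t) (fun x => x)

theorem common_eq_filter_length {κ : Type} [BEq κ] [LawfulBEq κ] (P Q : List κ) (hQ : Q.Nodup) :
    common P Q = ((P.filter (fun a => decide (a ∈ Q))).length : Int) := by
  induction P with
  | nil => simp [common]
  | cons a P ih =>
    simp only [common, List.map_cons, List.sum_cons] at *
    by_cases ha : a ∈ Q
    · rw [List.filter_cons_of_pos (by simpa using ha)]
      have h1 : Q.count a = 1 := le_antisymm (List.nodup_iff_count_le_one.1 hQ a) (List.count_pos_iff.2 ha)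
      rw [h1, ih]
      simp only [List.length_cons]
      push_cast
      ring
    · rw [List.filter_cons_of_neg (by simpa using ha)]
      rw [List.count_eq_zero_of_not_mem ha, ih]
      push_cast
      ring

theorem nodup_of_pairwise_lt {α : Type} [Preorder α] {l : List α} (h : l.Pairwise (· < ·)) :
    l.Nodup :=
  h.imp (fun hab => ne_of_lt hab)

theorem canon_pairwise (t : List Int) : (canon t).Pairwise (· < ·) := by
  have h1 := PySem.List.sorted_pairwise (PySem.Set.ofList t) (fun x : Int => x)
  have h2 : (canon t).Nodup :=
    ((PySem.List.sorted_perm (PySem.Set.ofList t) (fun x : Int => x) false).nodup_iff).2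
      (PySem.Set.nodup_ofList t)
  exact (h1.and h2).imp (fun ⟨hle, hne⟩ => lt_of_le_of_ne hle hne)

theorem canon_perm (t : List Int) : (canon t).Perm (PySem.Set.ofList t) :=
  PySem.List.sorted_perm _ _ _

theorem canon_length (t : List Int) : (canon t).length = (PySem.Set.ofList t).length :=
  (canon_perm t).length_eq

theorem lpairs_fst_mem {α : Type} : ∀ (l : List α) (p : α × α), p ∈ lpairs l → p.1 ∈ l ∧ p.2 ∈ l := by
  intro l
  induction l with
  | nil => intro p h; cases h
  | cons x l ih =>
    intro p hp
    rcases List.mem_append.1 hp with h | h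
    · rcases List.mem_map.1 h with ⟨y, hy, rfl⟩
      exact ⟨List.mem_cons_self, List.mem_cons_of_mem _ hy⟩
    · rcases ih p h with ⟨h1, h2⟩
      exact ⟨List.mem_cons_of_mem _ h1, List.mem_cons_of_mem _ h2⟩

theorem lpairs_lt {α : Type} [Preorder α] :
    ∀ (l : List α), l.Pairwise (· < ·) → ∀ p ∈ lpairs l, p.1 < p.2 := by
  intro l
  induction l with
  | nil => intro _ p h; cases h
  | cons x l ih =>
    intro h p hp
    rcases List.pairwise_cons.1 h with ⟨hx, hl⟩
    rcases List.mem_append.1 hp with hm | hm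
    · rcases List.mem_map.1 hm with ⟨y, hy, rfl⟩
      exact hx y hy
    · exact ih hl p hm

theorem lpairs_nodup {α : Type} : ∀ (l : List α), l.Nodup → (lpairs l).Nodup := by
  intro l
  induction l with
  | nil => intro _; exact List.nodup_nil
  | cons x l ih =>
    intro h
    rcases List.nodup_cons.1 h with ⟨hx, hl⟩
    apply List.Nodup.append
    · exact hl.map (fun a b hab => (Prod.mk.injEq _ _ _ _ ▸ hab : x = x ∧ a = b).2)
    · exact ih hl
    · intro p hp1 hp2
      rcases List.mem_map.1 hp1 with ⟨y, _, rfl⟩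
      exact hx ((lpairs_fst_mem l _ hp2).1)

theorem mem_lpairs_sorted {α : Type} [Preorder α] :
    ∀ (l : List α), l.Pairwise (· < ·) → ∀ a b : α,
      ((a, b) ∈ lpairs l ↔ a ∈ l ∧ b ∈ l ∧ a < b) := by
  intro l
  induction l with
  | nil => intro _ a b; simp [lpairs]
  | cons x l ih =>
    intro h a b
    rcases List.pairwise_cons.1 h with ⟨hx, hl⟩
    constructor
    · intro hp
      rcases List.mem_append.1 hp with hm | hm
      · rcases List.mem_map.1 hm with ⟨y, hy, he⟩
        cases he
        exact ⟨List.mem_cons_self, List.mem_cons_of_mem _ hy, hx _ hy⟩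
      · rcases (ih hl a b).1 hm with ⟨h1, h2, h3⟩
        exact ⟨List.mem_cons_of_mem _ h1, List.mem_cons_of_mem _ h2, h3⟩
    · rintro ⟨ha, hb, hab⟩
      rcases List.mem_cons.1 ha with rfl | ha'
      · rcases List.mem_cons.1 hb with rfl | hb'
        · exact absurd hab (lt_irrefl _)
        · exact List.mem_append.2 (Or.inl (List.mem_map.2 ⟨b, hb', rfl⟩))
      · rcases List.mem_cons.1 hb with rfl | hb'
        · exact absurd hab (not_lt_of_gt (hx a ha'))
        · exact List.mem_append.2 (Or.inr ((ih hl a b).2 ⟨ha', hb', hab⟩))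

theorem filter_both {α : Type} (q : α → Bool) :
    ∀ (l : List α), (lpairs l).filter (fun p => q p.1 && q p.2) = lpairs (l.filter q) := by
  intro l
  induction l with
  | nil => simp [lpairs]
  | cons x l ih =>
    simp only [lpairs, List.filter_append, List.filter_map, ih]
    by_cases hq : q x = true
    · rw [List.filter_cons_of_pos hq]
      simp only [lpairs]
      congr 2
      apply List.filter_congr
      intro y _
      simp [hq]
    · rw [List.filter_cons_of_neg (by simp [hq])]
      have hnil : l.filter ((fun p : α × α => q p.1 && q p.2) ∘ fun y => (x, y)) = [] :=
        List.filter_eq_nil_iff.2 (by intro y _; simp [hq])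
      rw [hnil]
      simp

theorem length_lpairs_C2 {α : Type} : ∀ (l : List α), ((lpairs l).length : Int) = C2 (l.length) := by
  intro l
  induction l with
  | nil => simp [lpairs]; decide
  | cons x l ih =>
    simp only [lpairs, List.length_append, List.length_map, List.length_cons]
    push_cast
    rw [ih]
    push_cast [C2_succ]
    ring

theorem common_lpairs (vs ws : List Int) (hv : vs.Pairwise (· < ·)) (hw : ws.Pairwise (· < ·)) :
    common (lpairs vs) (lpairs ws)
      = C2 (((vs.filter (fun a => decide (a ∈ ws))).length : Int)) := by
  rw [common_eq_filter_length _ _ (lpairs_nodup ws (nodup_of_pairwise_lt hw))]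
  have hcong : (lpairs vs).filter (fun p => decide (p ∈ lpairs ws))
      = (lpairs vs).filter (fun p => decide (p.1 ∈ ws) && decide (p.2 ∈ ws)) := by
    apply List.filter_congr
    intro p hp
    have hlt := lpairs_lt vs hv p hp
    have hiff := mem_lpairs_sorted ws hw p.1 p.2
    rw [Prod.mk.eta] at hiff
    by_cases hm : p.1 ∈ ws ∧ p.2 ∈ ws
    · simp [hiff, hm.1, hm.2, hlt]
    · have hnm : ¬ p ∈ lpairs ws := fun h => hm ⟨(lpairs_fst_mem ws p h).1, (lpairs_fst_mem ws p h).2⟩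
      rcases not_and_or.1 hm with h1 | h1 <;> simp [hnm, h1]
  have hfb := filter_both (fun a => decide (a ∈ ws)) vs
  beta_reduce at hfb
  rw [hcong, hfb, length_lpairs_C2]

theorem eq3_iff (vs ws : List Int) (hv : vs.Pairwise (· < ·)) (hw : ws.Pairwise (· < ·))
    (hv3 : vs.length ≤ 3) (hw3 : ws.length ≤ 3) :
    (vs.filter (fun a => decide (a ∈ ws))).length = 3 ↔ (vs = ws ∧ vs.length = 3) := by
  constructor
  · intro h3
    have hle := List.length_filter_le (fun a => decide (a ∈ ws)) vs
    have hlen : vs.length = 3 := by omega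
    have hall : ∀ a ∈ vs, (fun a => decide (a ∈ ws)) a = true :=
      List.length_filter_eq_length_iff.1 (by omega)
    have hsub : vs ⊆ ws := fun a ha => by simpa using hall a ha
    have hsp : vs.Subperm ws := (nodup_of_pairwise_lt hv).subperm hsub
    have hwlen : ws.length = 3 := le_antisymm hw3 (hlen ▸ hsp.length_le)
    have hperm : vs.Perm ws := hsp.perm_of_length_le (by omega)
    have e1 : PySem.List.sorted ws (fun x : Int => x) = vs :=
      PySem.List.sorted_eq_of_perm_of_pairwise_lt ws vs _ hperm hv
    have e2 : PySem.List.sorted ws (fun x : Int => x) = ws :=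
      PySem.List.sorted_eq_of_perm_of_pairwise_lt ws ws _ (List.Perm.refl ws) hw
    exact ⟨e1 ▸ e2, hlen⟩
  · rintro ⟨rfl, hlen⟩
    rw [List.filter_eq_self.2 (fun a ha => by simpa using ha)]
    exact hlen

def key3 (vs : List Int) : Int × Int × Int := (vs.getD 0 0, vs.getD 1 0, vs.getD 2 0)

def f3 (t : List Int) : List (Int × Int × Int) :=
  if (canon t).length = 3 then [key3 (canon t)] else []

theorem key3_inj {vs ws : List Int} (hv : vs.length = 3) (hw : ws.length = 3) :
    key3 vs = key3 ws ↔ vs = ws := by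
  rcases List.length_eq_three.1 hv with ⟨a, b, c, rfl⟩
  rcases List.length_eq_three.1 hw with ⟨d, e, f, rfl⟩
  simp [key3]

theorem common_f3 (t u : List Int) :
    common (f3 t) (f3 u)
      = if (canon t = canon u ∧ (canon t).length = 3) then 1 else 0 := by
  unfold f3
  by_cases h1 : (canon t).length = 3
  · by_cases h2 : (canon u).length = 3
    · rw [if_pos h1, if_pos h2]
      simp only [common, List.map_cons, List.map_nil, List.sum_cons, List.sum_nil,
        List.count_singleton, beq_iff_eq]
      by_cases he : canon t = canon u
      · simp [he, h2]
      · have hk : ¬ key3 (canon u) = key3 (canon t) :=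
          fun hkk => he ((key3_inj h1 h2).1 hkk.symm)
        simp [hk, he]
    · rw [if_pos h1, if_neg h2,
        if_neg (show ¬(canon t = canon u ∧ (canon t).length = 3) from fun hc => h2 (hc.1 ▸ hc.2))]
      simp [common]
  · rw [if_neg h1, if_neg (show ¬(canon t = canon u ∧ (canon t).length = 3) from fun hc => h1 hc.2)]
    simp [common]

theorem cond_eq_m (t u : List Int) :
    PySem.Set.len (PySem.Set.inter (PySem.Set.ofList t) (PySem.Set.ofList u))
      = (((canon t).filter (fun a => decide (a ∈ canon u))).length : Int) := by
  unfold PySem.Set.len PySem.Set.inter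
  congr 1
  rw [← List.countP_eq_length_filter, ← List.countP_eq_length_filter]
  rw [List.Perm.countP_eq _ (canon_perm t).symm]
  apply List.countP_congr
  intro a _
  simp [PySem.Set.contains, (canon_perm u).mem_iff]

-- per-pair core
theorem perpair (t u : List Int)
    (ht : (PySem.Set.ofList t).length ≤ 3) (hu : (PySem.Set.ofList u).length ≤ 3) :
    common (lpairs (canon t)) (lpairs (canon u)) - 3 * common (f3 t) (f3 u)
      = if PySem.Set.len (PySem.Set.inter (PySem.Set.ofList t) (PySem.Set.ofList u)) = 2
        then 1 else 0 := by
  have hv := canon_pairwise t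
  have hw := canon_pairwise u
  have hv3 : (canon t).length ≤ 3 := by rw [canon_length]; exact ht
  have hw3 : (canon u).length ≤ 3 := by rw [canon_length]; exact hu
  rw [common_lpairs _ _ hv hw, common_f3, cond_eq_m]
  set m := ((canon t).filter (fun a => decide (a ∈ canon u))).length with hm
  have hmle : m ≤ 3 := le_trans (List.length_filter_le _ _) hv3
  have h3 : (canon t = canon u ∧ (canon t).length = 3) ↔ m = 3 :=
    (eq3_iff _ _ hv hw hv3 hw3).symm
  simp only [h3]
  interval_cases m <;> decide


def KP (triples : List (List Int)) : List (Int × Int) := triples.flatMap (fun t => lpairs (canon t))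
def K3 (triples : List (List Int)) : List (Int × Int × Int) := triples.flatMap f3

theorem pairsEqI_f3 (t : List Int) : pairsEqI (f3 t) = 0 := by
  unfold f3
  split <;> simp [pairsEqI]

theorem A_normal (triples : List (List Int)) :
    edge_sharing_pairs triples
      = ((lpairs triples).map (fun p =>
          if PySem.Set.len (PySem.Set.inter (PySem.Set.ofList p.1) (PySem.Set.ofList p.2)) = 2
          then (1 : Int) else 0)).sum := by
  have hd := doubleLoop (σ := Int) triples []
    (fun count p =>
      if PySem.Set.len (PySem.Set.inter (PySem.Set.ofList p.1) (PySem.Set.ofList p.2)) = 2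
      then count + 1 else count) 0
  calc edge_sharing_pairs triples
      = (lpairs triples).foldl (fun count p =>
          if PySem.Set.len (PySem.Set.inter (PySem.Set.ofList p.1) (PySem.Set.ofList p.2)) = 2
          then count + 1 else count) 0 := hd
    _ = _ := by
        rw [PySem.List.foldl_ite_add_one
          (p := fun p : List Int × List Int =>
            PySem.Set.len (PySem.Set.inter (PySem.Set.ofList p.1) (PySem.Set.ofList p.2)) = 2)]
        rw [zero_add, ← PySem.List.sum_map_ite_one_zero
          (fun p : List Int × List Int =>
            decide (PySem.Set.len (PySem.Set.inter (PySem.Set.ofList p.1) (PySem.Set.ofList p.2)) = 2))]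
        exact congrArg List.sum (List.map_congr_left (fun p _ => by simp))

theorem values_C2 {κ : Type} [BEq κ] [LawfulBEq κ] (xs : List κ) :
    ((PySem.Dict.counter xs).values.map C2).sum = SC xs := by
  rw [PySem.Dict.values_eq_map_keys _ (PySem.Dict.nodup_keys_counter xs) 0, List.map_map,
    PySem.Dict.keys_counter]
  exact congrArg List.sum (List.map_congr_left
    (fun k _ => by simp [Function.comp, PySem.Dict.getD_counter]))

def pstep (d : PySem.Dict (Int × Int) Int) (k : Int × Int) : PySem.Dict (Int × Int) Int :=
  d.insert k (d.getD k 0 + 1)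

def tstep (d : PySem.Dict (Int × Int × Int) Int) (k : Int × Int × Int) :
    PySem.Dict (Int × Int × Int) Int :=
  d.insert k (d.getD k 0 + 1)

def Fstep (pc : PySem.Dict (Int × Int) Int) (t : List Int) : PySem.Dict (Int × Int) Int :=
  (PySem.List.pyRange 0 (PySem.List.len (canon t)) 1).foldl (fun pc i =>
    (PySem.List.pyRange (i + 1) (PySem.List.len (canon t)) 1).foldl (fun pc j =>
      pstep pc (PySem.List.pyGetD (canon t) i 0, PySem.List.pyGetD (canon t) j 0)) pc) pc

def Gstep (tc : PySem.Dict (Int × Int × Int) Int) (t : List Int) :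
    PySem.Dict (Int × Int × Int) Int :=
  if PySem.List.len (canon t) = 3 then
    tstep tc (PySem.List.pyGetD (canon t) 0 0, PySem.List.pyGetD (canon t) 1 0,
      PySem.List.pyGetD (canon t) 2 0)
  else tc

theorem Fstep_eq (pc : PySem.Dict (Int × Int) Int) (t : List Int) :
    Fstep pc t = (lpairs (canon t)).foldl pstep pc :=
  doubleLoop (canon t) 0 pstep pc

theorem Gstep_eq (tc : PySem.Dict (Int × Int × Int) Int) (t : List Int) :
    Gstep tc t = (f3 t).foldl tstep tc := by
  have hlen : (PySem.List.len (canon t) = 3) ↔ ((canon t).length = 3) := by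
    rw [PySem.List.len_eq]; exact_mod_cast Iff.rfl
  unfold Gstep f3
  by_cases h : (canon t).length = 3
  · rw [if_pos (hlen.2 h), if_pos h]
    simp [key3, PySem.List.pyGetD_ofNat']
  · rw [if_neg (fun hc => h (hlen.1 hc)), if_neg h]
    rfl

theorem B_normal (triples : List (List Int)) :
    edge_sharing_pairs_alt triples = SC (KP triples) - 3 * SC (K3 triples) := by
  show (triples.foldl (fun st t => (Fstep st.1 t, Gstep st.2 t))
      (PySem.Dict.empty, PySem.Dict.empty)).2.values.foldl
        (fun total c => total - 3 * PySem.Int.floordiv (c * (c - 1)) 2)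
        ((triples.foldl (fun st t => (Fstep st.1 t, Gstep st.2 t))
          (PySem.Dict.empty, PySem.Dict.empty)).1.values.foldl
            (fun total c => total + PySem.Int.floordiv (c * (c - 1)) 2) 0)
    = SC (KP triples) - 3 * SC (K3 triples)
  rw [PySem.List.foldl_prod_mk Fstep Gstep]
  have h1 : triples.foldl Fstep PySem.Dict.empty = PySem.Dict.counter (KP triples) := by
    rw [PySem.List.foldl_congr_mem triples Fstep
      (fun pc t => (lpairs (canon t)).foldl pstep pc) PySem.Dict.empty
      (fun acc t _ => Fstep_eq acc t)]
    rw [← List.foldl_flatMap]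
    exact PySem.Dict.foldl_insert_getD_add_one_eq_counter (KP triples)
  have h2 : triples.foldl Gstep PySem.Dict.empty = PySem.Dict.counter (K3 triples) := by
    rw [PySem.List.foldl_congr_mem triples Gstep
      (fun tc t => (f3 t).foldl tstep tc) PySem.Dict.empty
      (fun acc t _ => Gstep_eq acc t)]
    rw [← List.foldl_flatMap]
    exact PySem.Dict.foldl_insert_getD_add_one_eq_counter (K3 triples)
  rw [h1, h2]
  have htot : ((PySem.Dict.counter (KP triples)).values).foldl
      (fun total c => total + PySem.Int.floordiv (c * (c - 1)) 2) 0 = SC (KP triples) := by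
    rw [PySem.List.foldl_add _ (fun c => PySem.Int.floordiv (c * (c - 1)) 2) 0, zero_add]
    exact values_C2 (KP triples)
  rw [htot]
  rw [PySem.List.foldl_congr_mem (PySem.Dict.counter (K3 triples)).values
    (fun total c => total - 3 * PySem.Int.floordiv (c * (c - 1)) 2)
    (fun total c => total + (-3) * PySem.Int.floordiv (c * (c - 1)) 2)
    (SC (KP triples)) (fun acc c _ => by ring)]
  rw [PySem.List.foldl_add _ (fun c => (-3) * PySem.Int.floordiv (c * (c - 1)) 2) _]
  rw [List.sum_map_mul_left _ (fun c => PySem.Int.floordiv (c * (c - 1)) 2) (-3)]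
  rw [show (fun c : Int => PySem.Int.floordiv (c * (c - 1)) 2) = C2 from rfl,
    values_C2 (K3 triples)]
  ring

theorem perpair_sum (triples : List (List Int)) (hpre : ∀ t ∈ triples, (PySem.Set.ofList t).length ≤ 3) :
    SC (KP triples) - 3 * SC (K3 triples)
      = ((lpairs triples).map (fun p =>
          if PySem.Set.len (PySem.Set.inter (PySem.Set.ofList p.1) (PySem.Set.ofList p.2)) = 2
          then (1 : Int) else 0)).sum := by
  rw [SC_eq_pairsEqI, SC_eq_pairsEqI]
  unfold KP K3
  rw [pairsEqI_flatMap, pairsEqI_flatMap]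
  have hz1 : (triples.map (fun t => pairsEqI (lpairs (canon t)))).sum = 0 := by
    rw [List.map_congr_left (fun t _ => pairsEqI_nodup _
      (lpairs_nodup _ (nodup_of_pairwise_lt (canon_pairwise t))))]
    simp
  have hz2 : (triples.map (fun t => pairsEqI (f3 t))).sum = 0 := by
    rw [List.map_congr_left (fun t _ => pairsEqI_f3 t)]
    simp
  rw [hz1, hz2, add_zero, add_zero]
  have hsplit : ((lpairs triples).map (fun p => common (lpairs (canon p.1)) (lpairs (canon p.2)))).sum
      - 3 * ((lpairs triples).map (fun p => common (f3 p.1) (f3 p.2))).sum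
      = ((lpairs triples).map (fun p =>
          common (lpairs (canon p.1)) (lpairs (canon p.2)) - 3 * common (f3 p.1) (f3 p.2))).sum := by
    induction lpairs triples with
    | nil => simp
    | cons q l ih => simp only [List.map_cons, List.sum_cons]; rw [← ih]; ring
  rw [hsplit]
  apply congrArg List.sum
  apply List.map_congr_left
  intro p hp
  have hmem := lpairs_fst_mem triples p hp
  exact perpair p.1 p.2 (hpre p.1 hmem.1) (hpre p.2 hmem.2)

-- ===== VERDICT (by name: the statement is the Claim_ definition above) =====
theorem edge_sharing_pairs_spec : Claim_equal_edge_sharing_pairs := by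
  intro triples _ hpre
  unfold Spec_edge_sharing_pairs
  rw [A_normal, B_normal, perpair_sum triples hpre]
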